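-- pv_equiv track=rewrite | github.com/Tiimbbo/codingCompetition | codingComp.py | sumOfN
-- ===== SOURCE A (Python) =====
-- def isHipNum(n):
--     return ((n+1)**2 + n**2)
--
-- def sumOfN(n):
--     hipNum = []
--     i = 1
--     while len(hipNum) < n:
--         if isHipNum(i) not in hipNum:
--             hipNum.append(isHipNum(i))
--         i += 1
--     return sum(hipNum)
-- ===== SOURCE B (Python) =====
-- def sumOfN(n):
--     # closed form: sum_{i=1..n} ((i+1)**2 + i**2) = sum_{i=1..n} (2i^2+2i+1)
--     if n <= 0:
--         return 0
--     return n * (n + 1) * (2 * n + 1) // 3 + n * (n + 1) + n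
-- ===== Notes on version B (the rewrite author's own statement) =====
-- stated objective: faster
-- what changed: replaced the quadratic membership-test loop by the closed-form sum n(n+1)(2n+1)/3 + n(n+1) + n (with 0 for n<=0, as A's loop never runs then)
import Mathlib
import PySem

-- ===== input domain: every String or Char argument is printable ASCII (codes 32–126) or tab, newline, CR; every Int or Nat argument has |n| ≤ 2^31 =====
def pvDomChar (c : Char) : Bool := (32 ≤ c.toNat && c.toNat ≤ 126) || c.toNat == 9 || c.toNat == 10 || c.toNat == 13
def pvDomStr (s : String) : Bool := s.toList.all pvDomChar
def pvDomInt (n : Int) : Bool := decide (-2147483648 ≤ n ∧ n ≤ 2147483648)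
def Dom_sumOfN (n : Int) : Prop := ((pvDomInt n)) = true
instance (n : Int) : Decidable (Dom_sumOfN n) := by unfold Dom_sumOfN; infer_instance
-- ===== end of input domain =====

-- B replaces A's quadratic membership-test loop by the closed form n(n+1)(2n+1)/3 + n(n+1) + n (0 for n ≤ 0).

-- ===== PORT A =====
def isHipNumP (n : Int) : Int := (n + 1) ^ 2 + n ^ 2

-- the while loop; fuel n.natAbs is enough since every iteration appends (values are strictly increasing)
def sumOfNLoop (n : Int) (hipNum : List Int) (i : Int) : Nat → List Int
  | 0 => hipNum
  | fuel + 1 =>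
    if (hipNum.length : Int) < n then
      if hipNum.contains (isHipNumP i) then
        sumOfNLoop n hipNum (i + 1) fuel
      else
        sumOfNLoop n (hipNum ++ [isHipNumP i]) (i + 1) fuel
    else hipNum

def sumOfN (n : Int) : Int := (sumOfNLoop n [] 1 n.natAbs).sum

-- ===== PORT B =====
def sumOfN_alt (n : Int) : Int :=
  if n ≤ 0 then 0
  else PySem.Int.floordiv (n * (n + 1) * (2 * n + 1)) 3 + n * (n + 1) + n

-- ===== PRECONDITION & SPEC =====
def Spec_sumOfN (n : Int) (out : Int) : Prop := out = sumOfN_alt n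
instance (n : Int) (out : Int) : Decidable (Spec_sumOfN n out) := by unfold Spec_sumOfN; infer_instance

-- ===== CLAIM (what is proved, stated in full; the proofs are below) =====
def Claim_equal_sumOfN : Prop := ∀ (n : Int), Dom_sumOfN n → Spec_sumOfN n (sumOfN n)

-- ===== LEMMAS AND PROOFS =====
-- the list A builds after k (always-appending) iterations
def gHip (k : Nat) : List Int := (List.range k).map (fun j : Nat => isHipNumP ((j : Int) + 1))

lemma isHip_strictMono (a b : Nat) (h : a < b) :
    isHipNumP ((a : Int) + 1) < isHipNumP ((b : Int) + 1) := by
  have : (a : Int) < (b : Int) := by exact_mod_cast h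
  simp only [isHipNumP]
  nlinarith [this]

lemma new_not_mem (k : Nat) : isHipNumP ((k : Int) + 1) ∉ gHip k := by
  intro hmem
  simp only [gHip] at hmem
  obtain ⟨j, hj, hje⟩ := List.mem_map.mp hmem
  rw [List.mem_range] at hj
  have := isHip_strictMono j k hj
  omega

lemma gHip_length (k : Nat) : (gHip k).length = k := by
  simp [gHip]

lemma loop_g (fuel : Nat) : ∀ (k : Nat) (n : Int), n ≤ (k : Int) + fuel →
    sumOfNLoop n (gHip k) ((k : Int) + 1) fuel = gHip (max k n.toNat) := by
  induction fuel with
  | zero =>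
    intro k n h
    simp only [sumOfNLoop]
    have : n.toNat ≤ k := by omega
    rw [Nat.max_eq_left this]
  | succ fuel ih =>
    intro k n h
    simp only [sumOfNLoop, gHip_length]
    by_cases hk : (k : Int) < n
    · rw [if_pos hk]
      have hc : (gHip k).contains (isHipNumP ((k : Int) + 1)) = false := by
        simp only [List.contains_eq_mem, decide_eq_false_iff_not]
        exact new_not_mem k
      rw [hc]
      simp only [Bool.false_eq_true, if_false]
      have happ : gHip k ++ [isHipNumP ((k : Int) + 1)] = gHip (k + 1) := by
        simp [gHip, List.range_succ]
      have hcast : (k : Int) + 1 + 1 = ((k + 1 : Nat) : Int) + 1 := by push_cast; ring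
      rw [happ, hcast, ih (k + 1) n (by push_cast; omega)]
      have h1 : max (k + 1) n.toNat = n.toNat := by omega
      have h2 : max k n.toNat = n.toNat := by omega
      rw [h1, h2]
    · rw [if_neg hk]
      have : n.toNat ≤ k := by omega
      rw [Nat.max_eq_left this]

lemma sumOfN_eq_g (n : Int) : sumOfN n = (gHip n.toNat).sum := by
  have h0 : gHip 0 = [] := by simp [gHip]
  have := loop_g n.natAbs 0 n (by omega)
  simp only [Nat.cast_zero, zero_add, h0, Nat.max_eq_right (Nat.zero_le _)] at this
  simp only [sumOfN]
  rw [this]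

lemma gHip_sum3 (m : Nat) :
    3 * (gHip m).sum = (m : Int) * (m + 1) * (2 * m + 1) + 3 * ((m : Int) * (m + 1)) + 3 * m := by
  induction m with
  | zero => simp [gHip]
  | succ m ih =>
    have : gHip (m + 1) = gHip m ++ [isHipNumP ((m : Int) + 1)] := by
      simp [gHip, List.range_succ]
    rw [this, List.sum_append]
    push_cast
    simp only [List.sum_cons, List.sum_nil, isHipNumP]
    nlinarith [ih]

-- ===== VERDICT (by name: the statement is the Claim_ definition above) =====
theorem sumOfN_spec : Claim_equal_sumOfN := by
  intro n _
  unfold Spec_sumOfN sumOfN_alt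
  rw [sumOfN_eq_g]
  by_cases hn : n ≤ 0
  · rw [if_pos hn]
    have : n.toNat = 0 := by omega
    simp [this, gHip]
  · rw [if_neg hn]
    have hcast : ((n.toNat : Nat) : Int) = n := by omega
    have h3 := gHip_sum3 n.toNat
    rw [hcast] at h3
    have hdvd : n * (n + 1) * (2 * n + 1) = 3 * ((gHip n.toNat).sum - n * (n + 1) - n) := by ring_nf; linarith [h3]
    rw [hdvd, PySem.Int.floordiv_eq_ediv_of_pos (by norm_num),
      Int.mul_ediv_cancel_left _ (by norm_num : (3:Int) ≠ 0)]
    ring
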